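-- pv_equiv track=rewrite | github.com/time-off-io/timeoff-leave_request-to-docx | timeoff_export_docx.py | str_upto
-- ===== SOURCE A (Python) =====
-- def str_upto(value: str, up_to: int, fill_with: str = " ") -> str:
--     """Returns a string with the length of up_to, filled with the value of fill_with variable."""
--     if len(value) == up_to:
--         return value
--
--     if len(value) > up_to:
--         return value[:up_to]
--
--     while len(value) < up_to:
--         value = f"{value}{fill_with}"
--     return value
-- ===== SOURCE B (Python) =====
-- def str_upto(value: str, up_to: int, fill_with: str = " ") -> str:
--     """Returns a string with the length of up_to, filled with the value of fill_with variable."""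
--     if len(value) >= up_to:
--         return value[:up_to]
--     n = -(-(up_to - len(value)) // len(fill_with))
--     return value + fill_with * n
-- ===== Notes on version B (the rewrite author's own statement) =====
-- stated objective: idiomatic
-- what changed: Replaced the append-one-copy-at-a-time while loop with a closed-form ceiling division computing the number of fill copies, appended in one string multiplication; the two truncation guards merge into one >= branch.
-- outside the precondition, e.g. on str_upto('ab', 5, ''): A does not finish within the time limit, B raises ZeroDivisionError
import Mathlib
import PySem

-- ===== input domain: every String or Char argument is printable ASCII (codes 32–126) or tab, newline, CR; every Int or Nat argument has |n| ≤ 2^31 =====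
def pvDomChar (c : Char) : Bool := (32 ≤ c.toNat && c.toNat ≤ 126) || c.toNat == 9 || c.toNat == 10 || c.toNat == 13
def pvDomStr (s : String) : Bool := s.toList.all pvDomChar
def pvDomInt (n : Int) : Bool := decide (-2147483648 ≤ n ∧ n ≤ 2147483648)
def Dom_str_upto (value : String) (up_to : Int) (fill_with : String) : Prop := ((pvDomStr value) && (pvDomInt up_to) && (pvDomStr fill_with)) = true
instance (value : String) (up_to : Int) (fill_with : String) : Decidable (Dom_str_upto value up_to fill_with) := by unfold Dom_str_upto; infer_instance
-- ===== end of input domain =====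

-- B replaces A's append-one-copy-at-a-time while loop by a closed-form ceiling division
-- giving the number of fill copies, appended at once.

-- ===== PORT A =====
-- A's while loop; the `0 < f.length` guard only makes the function total where the
-- Python loop does not terminate (excluded by Pre_str_upto below).
def strUptoLoopA (v : List Char) (up_to : Int) (f : List Char) : List Char :=
  if h : (v.length : Int) < up_to ∧ 0 < f.length then
    strUptoLoopA (v ++ f) up_to f
  else v
termination_by (up_to - v.length).toNat
decreasing_by simp only [List.length_append]; omega

def str_upto (value : String) (up_to : Int) (fill_with : String) : String :=
  let v := value.toList
  if (v.length : Int) = up_to then value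
  else if (v.length : Int) > up_to then String.ofList (PySem.List.slice v none (some up_to))
  else String.ofList (strUptoLoopA v up_to fill_with.toList)

-- ===== PORT B =====
def str_upto_alt (value : String) (up_to : Int) (fill_with : String) : String :=
  let v := value.toList
  if (v.length : Int) ≥ up_to then String.ofList (PySem.List.slice v none (some up_to))
  else
    let n : Int := -(PySem.Int.floordiv (-(up_to - v.length)) fill_with.toList.length)
    String.ofList (v ++ (List.replicate n.toNat fill_with.toList).flatten)

-- ===== PRECONDITION & SPEC =====
-- Pre_ excludes exactly the inputs where A loops forever (padding needed but fill_with
-- empty); B raises ZeroDivisionError there.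
def Pre_str_upto (value : String) (up_to : Int) (fill_with : String) : Prop :=
  up_to ≤ (value.toList.length : Int) ∨ fill_with ≠ ""
instance (value : String) (up_to : Int) (fill_with : String) : Decidable (Pre_str_upto value up_to fill_with) := by unfold Pre_str_upto; infer_instance

def pvWitness_str_upto : String × Int × String := ("ab", 7, "xy")

def Spec_str_upto (value : String) (up_to : Int) (fill_with : String) (out : String) : Prop := out = str_upto_alt value up_to fill_with
instance (value : String) (up_to : Int) (fill_with : String) (out : String) : Decidable (Spec_str_upto value up_to fill_with out) := by unfold Spec_str_upto; infer_instance

-- ===== CLAIM =====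
def Claim_equal_str_upto : Prop := ∀ (value : String) (up_to : Int) (fill_with : String), Dom_str_upto value up_to fill_with → Pre_str_upto value up_to fill_with → Spec_str_upto value up_to fill_with (str_upto value up_to fill_with)

-- ===== LEMMAS AND PROOFS =====

-- The loop result equals value plus ⌈(up_to - len)/|fill|⌉ copies of fill.
theorem strUptoLoopA_eq (up_to : Int) (f : List Char) (hf : 0 < f.length) :
    ∀ (v : List Char), (v.length : Int) < up_to →
      strUptoLoopA v up_to f =
        v ++ (List.replicate (-(PySem.Int.floordiv (-(up_to - v.length)) f.length)).toNat f).flatten := by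
  intro v hv
  induction v using strUptoLoopA.induct up_to f with
  | case1 v h ih =>
    rw [strUptoLoopA, dif_pos h]
    set d : Int := up_to - v.length with hd
    have hd0 : 0 < d := by omega
    by_cases hstep : (v.length : Int) + f.length < up_to
    · -- another loop iteration remains
      have ih' := ih (by simpa using hstep)
      rw [ih']
      have hc : -(PySem.Int.floordiv (-d) (f.length : Int)) =
          -(PySem.Int.floordiv (-(up_to - ((v ++ f).length : Int))) (f.length : Int)) + 1 := by
        set q : Int := -(PySem.Int.floordiv (-(up_to - ((v ++ f).length : Int))) (f.length : Int)) with hq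
        have h1 := (PySem.Int.neg_floordiv_neg_eq_iff_of_pos
          (a := up_to - ((v ++ f).length : Int)) (b := (f.length : Int)) (q := q)
          (by exact_mod_cast hf)).mp rfl
        refine (PySem.Int.neg_floordiv_neg_eq_iff_of_pos (by exact_mod_cast hf)).mpr ?_
        simp only [List.length_append, Nat.cast_add] at h1 ⊢
        constructor <;> nlinarith [h1.1, h1.2]
      rw [hc]
      have hq1 : 1 ≤ -(PySem.Int.floordiv (-(up_to - ((v ++ f).length : Int))) (f.length : Int)) := by
        have h1 := (PySem.Int.neg_floordiv_neg_eq_iff_of_pos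
          (a := up_to - ((v ++ f).length : Int)) (b := (f.length : Int))
          (q := -(PySem.Int.floordiv (-(up_to - ((v ++ f).length : Int))) (f.length : Int)))
          (by exact_mod_cast hf)).mp rfl
        have hlen : (((v ++ f).length : Nat) : Int) = (v.length : Int) + f.length := by
          push_cast [List.length_append]; ring
        have hfI : (0 : Int) < (f.length : Int) := by exact_mod_cast hf
        nlinarith [h1.2, hlen, hstep, hfI]
      have : (-(PySem.Int.floordiv (-(up_to - ((v ++ f).length : Int))) (f.length : Int)) + 1).toNat
          = (-(PySem.Int.floordiv (-(up_to - ((v ++ f).length : Int))) (f.length : Int))).toNat + 1 := by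
        omega
      rw [this, List.replicate_succ, List.flatten_cons, List.append_assoc]
    · -- last iteration: one copy finishes the job; the ceiling is 1
      have hstop : strUptoLoopA (v ++ f) up_to f = v ++ f := by
        rw [strUptoLoopA, dif_neg]
        simp only [List.length_append, Nat.cast_add, not_and]
        intro hlt; omega
      rw [hstop]
      have hc : -(PySem.Int.floordiv (-d) (f.length : Int)) = 1 := by
        refine (PySem.Int.neg_floordiv_neg_eq_iff_of_pos (by exact_mod_cast hf)).mpr ?_
        push_cast at hstep
        constructor <;> omega
      rw [hc]
      simp
  | case2 v h =>
    exfalso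
    exact h ⟨hv, hf⟩


-- ===== VERDICT =====
theorem str_upto_spec : Claim_equal_str_upto := by
  intro value up_to fill_with _ hpre
  unfold Spec_str_upto str_upto str_upto_alt
  simp only
  by_cases heq : ((value.toList.length : Int) = up_to)
  · rw [if_pos heq, if_pos (le_of_eq heq.symm), ← heq]
    rw [PySem.List.slice_to_natCast, List.take_length, String.ofList_toList]
  · by_cases hgt : ((value.toList.length : Int) > up_to)
    · rw [if_neg heq, if_pos hgt, if_pos (le_of_lt hgt)]
    · have hlt : (value.toList.length : Int) < up_to := by omega
      rw [if_neg heq, if_neg hgt, if_neg (by omega)]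
      have hf : 0 < fill_with.toList.length := by
        rcases hpre with h | h
        · omega
        · have hne : fill_with.toList ≠ [] := by
            simpa using h
          cases hE : fill_with.toList with
          | nil => exact absurd hE hne
          | cons a l => simp
      rw [strUptoLoopA_eq up_to fill_with.toList hf value.toList hlt]
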